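-- pv_equiv track=rewrite | github.com/JuniorDevNam/Python | Lớp 12/Một số bài tập luyện tập trên HNOJ/Thi thử 28-29 tháng 12 năm 2024/bai3/bai3.py | find_max_gcd
-- ===== SOURCE A (Python) =====
-- def gcd(a, b):
--     while b:
--         a, b = b, a % b
--     return a
--
-- def find_max_gcd(arr):
--     n = len(arr)
--     if n == 1:
--         return arr[0]
--
--     prefix_gcd = [0] * n
--     suffix_gcd = [0] * n
--
--     prefix_gcd[0] = arr[0]
--     for i in range(1, n):
--         prefix_gcd[i] = gcd(prefix_gcd[i-1], arr[i])
--
--     suffix_gcd[n-1] = arr[n-1]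
--     for i in range(n-2, -1, -1):
--         suffix_gcd[i] = gcd(suffix_gcd[i+1], arr[i])
--
--     max_gcd = max(suffix_gcd[1], prefix_gcd[n-2])
--
--     for i in range(1, n-1):
--         max_gcd = max(max_gcd, gcd(prefix_gcd[i-1], suffix_gcd[i+1]))
--
--     return max_gcd
-- ===== SOURCE B (Python) =====
-- def gcd(a, b):
--     while b:
--         a, b = b, a % b
--     return a
--
-- def find_max_gcd(arr):
--     n = len(arr)
--     if n == 1:
--         return arr[0]
--     best = None
--     for i in range(n):
--         left = 0
--         for x in arr[:i]:
--             left = gcd(left, x)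
--         right = 0
--         for x in reversed(arr[i + 1:]):
--             right = gcd(right, x)
--         c = gcd(left, right)
--         best = c if best is None else max(best, c)
--     return best
-- ===== Notes on version B (the rewrite author's own statement) =====
-- stated objective: simpler
-- what changed: B drops A's prefix/suffix gcd tables and combining pass entirely: for each index i it recomputes the gcd of the remaining elements directly (left fold of gcd over arr[:i], right fold over reversed(arr[i+1:])) and keeps a running max.
-- outside the precondition, e.g. on find_max_gcd([]): A raises IndexError, B returns None
import Mathlib
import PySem

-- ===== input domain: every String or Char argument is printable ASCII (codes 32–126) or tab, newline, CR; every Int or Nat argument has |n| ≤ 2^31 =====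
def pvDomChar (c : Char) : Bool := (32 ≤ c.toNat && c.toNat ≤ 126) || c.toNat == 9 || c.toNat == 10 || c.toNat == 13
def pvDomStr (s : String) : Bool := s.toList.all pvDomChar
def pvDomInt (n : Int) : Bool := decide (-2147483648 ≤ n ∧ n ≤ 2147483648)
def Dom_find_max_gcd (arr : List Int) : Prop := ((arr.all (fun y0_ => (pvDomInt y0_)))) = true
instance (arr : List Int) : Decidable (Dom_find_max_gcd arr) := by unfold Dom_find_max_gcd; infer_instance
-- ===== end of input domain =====

-- B replaces A's prefix/suffix gcd tables by a direct per-index recomputation of the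
-- gcd of the remaining elements (alternative decomposition, O(n^2) vs A's O(n)).

-- ===== PORT A =====
-- shared helper: the Python 'gcd' (Euclid with Python's floor '%'), defined identically in Source A and Source B
def pygcd (a b : Int) : Int :=
  if h : b = 0 then a else pygcd b (PySem.Int.mod a b)
termination_by b.natAbs
decreasing_by
  rcases lt_or_gt_of_ne h with hb | hb
  · have := PySem.Int.mod_neg_bounds a hb; omega
  · have h1 := PySem.Int.mod_lt a hb
    have h2 := PySem.Int.mod_nonneg a hb
    omega

-- literal port of A; indices are in range under Pre_ (arr ≠ []), where pyGetD _ _ 0 is exact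
def find_max_gcd (arr : List Int) : Int :=
  let n : Int := arr.length
  if n == 1 then PySem.List.pyGetD arr 0 0
  else
    let prefix0 : List Int := (List.replicate arr.length 0).set 0 (PySem.List.pyGetD arr 0 0)
    let prefixg : List Int := (PySem.List.pyRange 1 n 1).foldl
      (fun p i => p.set i.toNat (pygcd (PySem.List.pyGetD p (i-1) 0) (PySem.List.pyGetD arr i 0))) prefix0
    let suffix0 : List Int := (List.replicate arr.length 0).set (arr.length - 1) (PySem.List.pyGetD arr (n-1) 0)
    let suffixg : List Int := (PySem.List.pyRange (n-2) (-1) (-1)).foldl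
      (fun s i => s.set i.toNat (pygcd (PySem.List.pyGetD s (i+1) 0) (PySem.List.pyGetD arr i 0))) suffix0
    let m0 := max (PySem.List.pyGetD suffixg 1 0) (PySem.List.pyGetD prefixg (n-2) 0)
    (PySem.List.pyRange 1 (n-1) 1).foldl
      (fun m i => max m (pygcd (PySem.List.pyGetD prefixg (i-1) 0) (PySem.List.pyGetD suffixg (i+1) 0))) m0

-- ===== PORT B =====
-- literal port of Source B: for each i, fold gcd over arr[:i] and over reversed(arr[i+1:])
def find_max_gcd_alt (arr : List Int) : Int :=
  let n : Int := arr.length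
  if n == 1 then PySem.List.pyGetD arr 0 0
  else
    let best := (PySem.List.pyRange 0 n 1).foldl
      (fun best i =>
        let left := (PySem.List.slice arr none (some i)).foldl (fun a x => pygcd a x) 0
        let right := ((PySem.List.slice arr (some (i+1)) none).reverse).foldl (fun a x => pygcd a x) 0
        let c := pygcd left right
        match best with
        | none => some c
        | some b => some (max b c)) (none : Option Int)
    best.getD 0  -- Python B returns best, which is never None when arr ≠ []

-- ===== PRECONDITION & SPEC =====
-- Pre_ excludes only the empty list, on which A raises IndexError (arr[0]).
def Pre_find_max_gcd (arr : List Int) : Prop := arr ≠ []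
instance (arr : List Int) : Decidable (Pre_find_max_gcd arr) := by unfold Pre_find_max_gcd; infer_instance
def pvWitness_find_max_gcd : List Int := [6, 4]

def Spec_find_max_gcd (arr : List Int) (out : Int) : Prop := out = find_max_gcd_alt arr
instance (arr : List Int) (out : Int) : Decidable (Spec_find_max_gcd arr out) := by unfold Spec_find_max_gcd; infer_instance

-- ===== CLAIM (what is proved, stated in full; the proofs are below) =====
def Claim_equal_find_max_gcd : Prop := ∀ (arr : List Int), Dom_find_max_gcd arr → Pre_find_max_gcd arr → Spec_find_max_gcd arr (find_max_gcd arr)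

-- ===== LEMMAS AND PROOFS =====

-- reference values: left-fold gcd of a prefix, right-fold gcd of a suffix, candidate at i
def prefG (l : List Int) : Int := l.foldl (fun a x => pygcd a x) 0
def sufG (l : List Int) : Int := l.reverse.foldl (fun a x => pygcd a x) 0
def candG (arr : List Int) (i : Nat) : Int := pygcd (prefG (arr.take i)) (sufG (arr.drop (i+1)))

theorem pygcd_zero_right (a : Int) : pygcd a 0 = a := by
  unfold pygcd; simp

theorem pygcd_zero_left (a : Int) : pygcd 0 a = a := by
  by_cases h : a = 0
  · simp [h, pygcd_zero_right]
  · unfold pygcd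
    have hm : PySem.Int.mod 0 a = 0 := by
      simp [PySem.Int.mod_eq_zero_iff_dvd]
    simp [h, hm, pygcd_zero_right]

theorem prefG_append (l : List Int) (x : Int) : prefG (l ++ [x]) = pygcd (prefG l) x := by
  simp [prefG, List.foldl_append]

theorem sufG_cons (x : Int) (l : List Int) : sufG (x :: l) = pygcd (sufG l) x := by
  simp [sufG, List.foldl_append]

theorem foldl_max_pull (l : List Int) (a b : Int) :
    l.foldl max (max a b) = max (l.foldl max a) b := by
  induction l generalizing a with
  | nil => rfl
  | cons x t ih => simp only [List.foldl_cons, max_right_comm a b x, ih]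

-- A's prefix loop invariant
theorem prefix_loop (arr : List Int) (m : Nat) (hm : m = arr.length) :
    ∀ (k : Nat) (t : Nat) (P : List Int), t + k = m → 1 ≤ t →
    P.length = m →
    (∀ j : Nat, j < t → P[j]? = some (prefG (arr.take (j+1)))) →
    ((PySem.List.pyRange (t : Int) (m : Int) 1).foldl
      (fun p i => p.set i.toNat (pygcd (PySem.List.pyGetD p (i-1) 0) (PySem.List.pyGetD arr i 0))) P).length = m ∧
    ∀ j : Nat, j < m → ((PySem.List.pyRange (t : Int) (m : Int) 1).foldl
      (fun p i => p.set i.toNat (pygcd (PySem.List.pyGetD p (i-1) 0) (PySem.List.pyGetD arr i 0))) P)[j]? = some (prefG (arr.take (j+1))) := by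
  intro k
  induction k with
  | zero =>
    intro t P h1 h2 h3 h4
    have ht : t = m := by omega
    rw [PySem.List.pyRange_one_eq_nil (by omega : (m:Int) ≤ (t:Int))]
    exact ⟨h3, fun j hj => h4 j (by omega)⟩
  | succ k ih =>
    intro t P h1 h2 h3 h4
    have htm : t < m := by omega
    rw [PySem.List.pyRange_one_cons (by exact_mod_cast htm : (t:Int) < (m:Int))]
    simp only [List.foldl_cons]
    have hc1 : ((t:Int) - 1) = ((t - 1 : Nat) : Int) := by push_cast [h2]; ring
    have hread : PySem.List.pyGetD P ((t:Int)-1) 0 = prefG (arr.take t) := by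
      rw [hc1, PySem.List.pyGetD_natCast, List.getD_eq_getElem?_getD,
        h4 (t-1) (by omega)]
      simp [Nat.sub_add_cancel h2]
    have harr : PySem.List.pyGetD arr (t:Int) 0 = arr[t]'(by omega) := by
      rw [PySem.List.pyGetD_natCast, List.getD_eq_getElem?_getD, List.getElem?_eq_getElem (by omega)]
      rfl
    have hval : pygcd (PySem.List.pyGetD P ((t:Int)-1) 0) (PySem.List.pyGetD arr (t:Int) 0)
        = prefG (arr.take (t+1)) := by
      rw [hread, harr,
        show arr.take (t+1) = arr.take t ++ [arr[t]'(by omega : t < arr.length)] from by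
          rw [List.take_add_one, List.getElem?_eq_getElem (by omega : t < arr.length)]; rfl,
        prefG_append]
    have hcast : ((t:Int) + 1) = ((t+1 : Nat) : Int) := by push_cast; ring
    rw [hval, hcast]
    have htoNat : ((t:Int)).toNat = t := by omega
    rw [htoNat]
    exact ih (t+1) (P.set t (prefG (arr.take (t+1)))) (by omega) (by omega)
      (by simp [h3])
      (by
        intro j hj
        by_cases hjt : j = t
        · subst hjt; rw [List.getElem?_set_self (by omega)]
        · rw [List.getElem?_set_ne (by omega)]; exact h4 j (by omega))

-- A's suffix loop invariant
theorem suffix_loop (arr : List Int) (m : Nat) (hm : m = arr.length) (hm2 : 2 ≤ m) :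
    ∀ (t : Nat) (S : List Int), t ≤ m - 1 →
    S.length = m →
    (∀ j : Nat, t ≤ j → j < m → S[j]? = some (sufG (arr.drop j))) →
    ((PySem.List.pyRange ((t : Int) - 1) (-1) (-1)).foldl
      (fun s i => s.set i.toNat (pygcd (PySem.List.pyGetD s (i+1) 0) (PySem.List.pyGetD arr i 0))) S).length = m ∧
    ∀ j : Nat, j < m → ((PySem.List.pyRange ((t : Int) - 1) (-1) (-1)).foldl
      (fun s i => s.set i.toNat (pygcd (PySem.List.pyGetD s (i+1) 0) (PySem.List.pyGetD arr i 0))) S)[j]? = some (sufG (arr.drop j)) := by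
  intro t
  induction t with
  | zero =>
    intro S ht h3 h4
    rw [PySem.List.pyRange_neg_one_eq_nil (by omega : ((0:Nat):Int) - 1 ≤ -1)]
    exact ⟨h3, fun j hj => h4 j (by omega) hj⟩
  | succ t ih =>
    intro S ht h3 h4
    have hc : ((t+1 : Nat) : Int) - 1 = (t : Int) := by push_cast; ring
    rw [hc, PySem.List.pyRange_neg_one_cons (by omega : (-1:Int) < (t:Int))]
    simp only [List.foldl_cons]
    have ht1m : t + 1 < m := by omega
    have hread : PySem.List.pyGetD S ((t:Int)+1) 0 = sufG (arr.drop (t+1)) := by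
      rw [show ((t:Int)+1) = ((t+1 : Nat) : Int) from by push_cast; ring,
        PySem.List.pyGetD_natCast, List.getD_eq_getElem?_getD, h4 (t+1) (by omega) (by omega)]
      rfl
    have harr : PySem.List.pyGetD arr (t:Int) 0 = arr[t]'(by omega) := by
      rw [PySem.List.pyGetD_natCast, List.getD_eq_getElem?_getD, List.getElem?_eq_getElem (by omega)]
      rfl
    have hval : pygcd (PySem.List.pyGetD S ((t:Int)+1) 0) (PySem.List.pyGetD arr (t:Int) 0)
        = sufG (arr.drop t) := by
      rw [hread, harr, List.drop_eq_getElem_cons (by omega : t < arr.length), sufG_cons]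
    have htoNat : ((t:Int)).toNat = t := by omega
    rw [hval, htoNat]
    have := ih (S.set t (sufG (arr.drop t))) (by omega) (by simp [h3])
      (by
        intro j hj1 hj2
        by_cases hjt : j = t
        · subst hjt; rw [List.getElem?_set_self (by omega)]
        · rw [List.getElem?_set_ne (by omega)]; exact h4 j (by omega) hj2)
    rwa [show ((t : Nat) : Int) - 1 = ((t:Int)) - 1 from rfl] at this

-- A's combining pass computes the running max of candG over [t, m-1)
theorem a_final_loop (arr prefixg suffixg : List Int) (m : Nat) (hm : m = arr.length)
    (hP : ∀ j : Nat, j < m → prefixg[j]? = some (prefG (arr.take (j+1))))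
    (hS : ∀ j : Nat, j < m → suffixg[j]? = some (sufG (arr.drop j))) :
    ∀ (k t : Nat) (acc : Int), t + k = m - 1 → 1 ≤ t → 2 ≤ m →
    (PySem.List.pyRange (t:Int) ((m:Int)-1) 1).foldl
      (fun mx i => max mx (pygcd (PySem.List.pyGetD prefixg (i-1) 0) (PySem.List.pyGetD suffixg (i+1) 0))) acc
    = ((List.range' t k).map (candG arr)).foldl max acc := by
  intro k
  induction k with
  | zero =>
    intro t acc h1 h2 h3
    rw [PySem.List.pyRange_one_eq_nil (by omega : (m:Int)-1 ≤ (t:Int))]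
    rfl
  | succ k ih =>
    intro t acc h1 h2 h3
    rw [PySem.List.pyRange_one_cons (by omega : (t:Int) < (m:Int)-1)]
    simp only [List.foldl_cons]
    have hpt : PySem.List.pyGetD prefixg ((t:Int)-1) 0 = prefG (arr.take t) := by
      rw [show ((t:Int)-1) = ((t-1 : Nat) : Int) from by push_cast [h2]; ring,
        PySem.List.pyGetD_natCast, List.getD_eq_getElem?_getD, hP (t-1) (by omega)]
      simp [Nat.sub_add_cancel h2]
    have hst : PySem.List.pyGetD suffixg ((t:Int)+1) 0 = sufG (arr.drop (t+1)) := by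
      rw [show ((t:Int)+1) = ((t+1 : Nat) : Int) from by push_cast; ring,
        PySem.List.pyGetD_natCast, List.getD_eq_getElem?_getD, hS (t+1) (by omega)]
      rfl
    rw [hpt, hst, show ((t:Int)+1) = ((t+1 : Nat) : Int) from by push_cast; ring,
      List.range'_succ]
    simp only [List.map_cons, List.foldl_cons]
    exact ih (t+1) (max acc (candG arr t)) (by omega) (by omega) h3

-- B's loop from index t with a some-accumulator is a running max of candG
theorem b_loop (arr : List Int) (m : Nat) (hm : m = arr.length) :
    ∀ (k t : Nat) (v : Int), t + k = m →
    (PySem.List.pyRange (t:Int) (m:Int) 1).foldl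
      (fun best i =>
        let left := (PySem.List.slice arr none (some i)).foldl (fun a x => pygcd a x) 0
        let right := ((PySem.List.slice arr (some (i+1)) none).reverse).foldl (fun a x => pygcd a x) 0
        let c := pygcd left right
        match best with
        | none => some c
        | some b => some (max b c)) (some v)
    = some (((List.range' t k).map (candG arr)).foldl max v) := by
  intro k
  induction k with
  | zero =>
    intro t v h1
    rw [PySem.List.pyRange_one_eq_nil (by omega : (m:Int) ≤ (t:Int))]
    rfl
  | succ k ih =>
    intro t v h1
    rw [PySem.List.pyRange_one_cons (by omega : (t:Int) < (m:Int))]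
    simp only [List.foldl_cons]
    have hleft : (PySem.List.slice arr none (some (t:Int))).foldl (fun a x => pygcd a x) 0
        = prefG (arr.take t) := by
      rw [PySem.List.slice_to arr (by omega : (0:Int) ≤ (t:Int))]
      simp [prefG]
    have hright : ((PySem.List.slice arr (some ((t:Int)+1)) none).reverse).foldl (fun a x => pygcd a x) 0
        = sufG (arr.drop (t+1)) := by
      rw [PySem.List.slice_from arr (by omega : (0:Int) ≤ (t:Int)+1)]
      have : ((t:Int)+1).toNat = t+1 := by omega
      rw [this]
      rfl
    simp only [hleft, hright]
    rw [List.range'_succ]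
    simp only [List.map_cons, List.foldl_cons]
    exact ih (t+1) (max v (candG arr t)) (by omega)

theorem prefG_single (x : Int) : prefG [x] = x := by
  simp [prefG, pygcd_zero_left]

theorem sufG_single (x : Int) : sufG [x] = x := by
  simp [sufG, pygcd_zero_left]

-- ===== VERDICT (by name: the statement is the Claim_ definition above) =====
theorem find_max_gcd_spec : Claim_equal_find_max_gcd := by
  intro arr _ hpre
  unfold Spec_find_max_gcd find_max_gcd find_max_gcd_alt
  by_cases hm1 : arr.length = 1
  · simp [hm1]
  · have hm0 : arr.length ≠ 0 := by simpa [List.length_eq_zero_iff] using hpre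
    have hm2 : 2 ≤ arr.length := by omega
    set m := arr.length with hmdef
    have hne : ((m:Int) == 1) = false := by
      simp only [beq_eq_false_iff_ne, ne_eq]
      intro h; exact hm1 (by exact_mod_cast h)
    simp only [hne, Bool.false_eq_true, if_false]
    have hlen0 : arr.length = m := hmdef.symm
    have hm1lt : m - 1 < arr.length := by omega
    have h0lt : 0 < arr.length := by omega
    -- prefix table
    have hP0inv : ∀ j : Nat, j < 1 →
        ((List.replicate m 0).set 0 (PySem.List.pyGetD arr 0 0))[j]? = some (prefG (arr.take (j+1))) := by
      intro j hj
      have hj0 : j = 0 := by omega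
      subst hj0
      rw [List.getElem?_set_self (by simp; omega)]
      congr 1
      rw [PySem.List.pyGetD_ofNat', List.getD_eq_getElem?_getD, List.getElem?_eq_getElem h0lt]
      rw [show arr.take (0+1) = [arr[0]'h0lt] from by
        rw [List.take_add_one, List.getElem?_eq_getElem h0lt]; rfl, prefG_single]
      rfl
    obtain ⟨hPlen, hP⟩ := prefix_loop arr m hmdef (m-1) 1
      ((List.replicate m 0).set 0 (PySem.List.pyGetD arr 0 0)) (by omega) le_rfl (by simp) hP0inv
    simp only [Nat.cast_one] at hP hPlen
    -- suffix table
    have hS0inv : ∀ j : Nat, m-1 ≤ j → j < m →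
        ((List.replicate m 0).set (m-1) (PySem.List.pyGetD arr ((m:Int) - 1) 0))[j]? = some (sufG (arr.drop j)) := by
      intro j hj1 hj2
      have hj0 : j = m - 1 := by omega
      subst hj0
      rw [List.getElem?_set_self (by simp; omega)]
      congr 1
      rw [show ((m:Int) - 1) = ((m-1 : Nat) : Int) from by omega,
        PySem.List.pyGetD_natCast, List.getD_eq_getElem?_getD, List.getElem?_eq_getElem hm1lt]
      rw [show arr.drop (m-1) = [arr[m-1]'hm1lt] from by
        rw [List.drop_eq_getElem_cons hm1lt, List.drop_eq_nil_of_le (by omega : arr.length ≤ m-1+1)],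
        sufG_single]
      rfl
    have hsuf := suffix_loop arr m hmdef hm2 (m-1)
      ((List.replicate m 0).set (m-1) (PySem.List.pyGetD arr ((m:Int) - 1) 0)) le_rfl (by simp) hS0inv
    rw [show ((m-1 : Nat) : Int) - 1 = (m:Int) - 2 from by omega] at hsuf
    obtain ⟨hSlen, hS⟩ := hsuf
    -- A's combining pass
    have hA := fun acc => a_final_loop arr _ _ m hmdef hP hS (m-2) 1 acc (by omega) le_rfl hm2
    simp only [Nat.cast_one] at hA
    rw [hA]
    -- the two seed reads
    have hc0 : candG arr 0 = sufG (arr.drop 1) := by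
      simp [candG, prefG, pygcd_zero_left]
    have hclast : candG arr (m-1) = prefG (arr.take (m-1)) := by
      unfold candG
      rw [List.drop_eq_nil_of_le (by omega : arr.length ≤ m-1+1)]
      rw [show sufG [] = 0 from rfl, pygcd_zero_right]
    have hs1 : PySem.List.pyGetD (List.foldl (fun s i => s.set i.toNat (pygcd (PySem.List.pyGetD s (i + 1) 0) (PySem.List.pyGetD arr i 0)))
        ((List.replicate m 0).set (m - 1) (PySem.List.pyGetD arr ((m:Int) - 1) 0))
        (PySem.List.pyRange ((m:Int) - 2) (-1) (-1))) 1 0 = candG arr 0 := by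
      rw [PySem.List.pyGetD_ofNat', List.getD_eq_getElem?_getD, hS 1 (by omega), hc0]
      rfl
    have hpm2 : PySem.List.pyGetD (List.foldl (fun p i => p.set i.toNat (pygcd (PySem.List.pyGetD p (i - 1) 0) (PySem.List.pyGetD arr i 0)))
        ((List.replicate m 0).set 0 (PySem.List.pyGetD arr 0 0)) (PySem.List.pyRange 1 (m:Int))) ((m:Int) - 2) 0
        = candG arr (m-1) := by
      rw [show ((m:Int) - 2) = ((m-2 : Nat) : Int) from by omega,
        PySem.List.pyGetD_natCast, List.getD_eq_getElem?_getD, hP (m-2) (by omega),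
        show m-2+1 = m-1 from by omega, hclast]
      rfl
    rw [hs1, hpm2]
    -- B's loop
    rw [PySem.List.pyRange_one_cons (by omega : (0:Int) < (m:Int))]
    simp only [List.foldl_cons]
    have hB := b_loop arr m hmdef (m-1) 1 (candG arr 0) (by omega)
    simp only [Nat.cast_one] at hB
    have hstep0 : (pygcd (List.foldl (fun a x => pygcd a x) 0 (PySem.List.slice arr none (some 0)))
        (List.foldl (fun a x => pygcd a x) 0 (PySem.List.slice arr (some (0+1)) none).reverse)) = candG arr 0 := by
      rw [PySem.List.slice_to arr (by omega : (0:Int) ≤ 0),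
        PySem.List.slice_from arr (by omega : (0:Int) ≤ 0+1)]
      rfl
    rw [show (0:Int)+1 = 1 from by ring] at hstep0 ⊢
    rw [hstep0] at *
    rw [hB, Option.getD_some, foldl_max_pull,
      show m-1 = (m-2)+1 from by omega, List.range'_concat]
    simp [List.foldl_append, show 1 + (m-2) = m-2+1 from by omega]
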